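-- pv_equiv track=rewrite | github.com/volcengine/verl | atropos/environments/intern_bootcamp/internbootcamp_lib/internbootcamp/bootcamp/masyu/masyu.py | _path_to_edges
-- ===== SOURCE A (Python) =====
-- from typing import List, Dict, Optional, Tuple
--
-- def _path_to_edges(directions: List[str]) -> List[Tuple[Tuple[int, int], str]]:
--     path = []
--     x, y = 0, 0
--     for d in directions:
--         prev = (x, y)
--         if d == 'R': y += 1
--         elif d == 'L': y -= 1
--         elif d == 'D': x += 1
--         elif d == 'U': x -= 1
--         path.append((prev, d))
--     return path
-- ===== SOURCE B (Python) =====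
-- from bisect import bisect_left
-- from typing import List, Tuple
--
-- def _path_to_edges(directions: List[str]) -> List[Tuple[Tuple[int, int], str]]:
--     # Inverted index: the (ascending) list of indices at which each move occurs.
--     R, L, D, U = [], [], [], []
--     for i, d in enumerate(directions):
--         if d == 'R': R.append(i)
--         elif d == 'L': L.append(i)
--         elif d == 'D': D.append(i)
--         elif d == 'U': U.append(i)
--     # Position before move i = (#D - #U, #R - #L) among moves with index < i,
--     # recovered by binary search into the index lists.
--     return [((bisect_left(D, i) - bisect_left(U, i),
--               bisect_left(R, i) - bisect_left(L, i)), d)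
--             for i, d in enumerate(directions)]
-- ===== Notes on version B (the rewrite author's own statement) =====
-- stated objective: alternative
-- what changed: B replaces A's running-coordinate accumulator by an inverted index: one pass records the occurrence indices of each of R/L/D/U, then each edge's prior position is reconstructed as differences of counts obtained by binary search (bisect_left) into those index lists.
import Mathlib
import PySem

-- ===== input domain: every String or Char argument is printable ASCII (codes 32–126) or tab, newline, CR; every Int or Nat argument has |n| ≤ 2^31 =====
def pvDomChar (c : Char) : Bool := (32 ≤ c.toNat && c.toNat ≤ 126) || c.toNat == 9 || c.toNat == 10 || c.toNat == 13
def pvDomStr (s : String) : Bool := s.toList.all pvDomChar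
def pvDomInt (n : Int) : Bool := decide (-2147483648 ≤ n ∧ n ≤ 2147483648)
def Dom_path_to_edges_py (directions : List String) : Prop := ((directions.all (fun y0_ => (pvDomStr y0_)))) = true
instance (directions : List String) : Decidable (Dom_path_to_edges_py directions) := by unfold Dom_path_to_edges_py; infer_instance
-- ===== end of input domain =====

-- B rebuilds each prior position from an inverted index (occurrence-index lists per direction,
-- queried by binary search) instead of A's running-coordinate loop; alternative algorithm, same outputs.

-- ===== PORT A =====
-- literal port of A: one loop threading (x, y, path), if/elif chain, append each step
def path_to_edges_py (directions : List String) : List ((Int × Int) × String) :=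
  (directions.foldl
    (fun (st : Int × Int × List ((Int × Int) × String)) d =>
      let x := st.1
      let y := st.2.1
      let path := st.2.2
      let prev := (x, y)
      let xy : Int × Int :=
        if d = "R" then (x, y + 1)
        else if d = "L" then (x, y - 1)
        else if d = "D" then (x + 1, y)
        else if d = "U" then (x - 1, y)
        else (x, y)
      (xy.1, xy.2, path ++ [(prev, d)]))
    (0, 0, [])).2.2

-- ===== PORT B =====
-- bisect.bisect_left: on the sorted (strictly ascending) lists B searches, the insertion
-- point is exactly the number of elements < x; exact on B's inputs.
def pvBisectLeft (l : List Int) (x : Int) : Int :=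
  ((l.countP (fun e => decide (e < x)) : Nat) : Int)

-- port of B: first loop builds the four occurrence-index lists; the comprehension then
-- pairs each (i, d) with the position recovered by binary-search counts
def path_to_edges_py_alt (directions : List String) : List ((Int × Int) × String) :=
  let occ : List Int × List Int × List Int × List Int :=
    (PySem.List.enumerate directions 0).foldl
      (fun st q =>
        if q.2 = "R" then (st.1 ++ [q.1], st.2.1, st.2.2.1, st.2.2.2)
        else if q.2 = "L" then (st.1, st.2.1 ++ [q.1], st.2.2.1, st.2.2.2)
        else if q.2 = "D" then (st.1, st.2.1, st.2.2.1 ++ [q.1], st.2.2.2)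
        else if q.2 = "U" then (st.1, st.2.1, st.2.2.1, st.2.2.2 ++ [q.1])
        else st)
      ([], [], [], [])
  (PySem.List.enumerate directions 0).map
    (fun q =>
      ((pvBisectLeft occ.2.2.1 q.1 - pvBisectLeft occ.2.2.2 q.1,
        pvBisectLeft occ.1 q.1 - pvBisectLeft occ.2.1 q.1), q.2))

-- ===== PRECONDITION & SPEC =====
def Spec_path_to_edges_py (directions : List String) (out : List ((Int × Int) × String)) : Prop := out = path_to_edges_py_alt directions
instance (directions : List String) (out : List ((Int × Int) × String)) : Decidable (Spec_path_to_edges_py directions out) := by unfold Spec_path_to_edges_py; infer_instance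

-- ===== CLAIM (what is proved, stated in full; the proofs are below) =====
def Claim_equal_path_to_edges_py : Prop := ∀ (directions : List String), Dom_path_to_edges_py directions → Spec_path_to_edges_py directions (path_to_edges_py directions)

-- ===== LEMMAS AND PROOFS =====

-- proof-side helpers
def pvFm (c : String) (l : List (Int × String)) : List Int :=
  l.filterMap (fun q => if q.2 = c then some q.1 else none)

-- signed count of a direction in a prefix
def pvCnt (c : String) (l : List String) : Int := ((l.count c : Nat) : Int)

-- reference form: edge i carries (#D-#U, #R-#L) over directions[:i]
def pvRef (ds : List String) : List ((Int × Int) × String) :=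
  (PySem.List.enumerate ds 0).map
    (fun q =>
      ((pvCnt "D" (ds.take q.1.toNat) - pvCnt "U" (ds.take q.1.toNat),
        pvCnt "R" (ds.take q.1.toNat) - pvCnt "L" (ds.take q.1.toNat)), q.2))

theorem pv_occ_fold (l : List (Int × String)) (a b c d : List Int) :
    (l.foldl
      (fun st (q : Int × String) =>
        if q.2 = "R" then (st.1 ++ [q.1], st.2.1, st.2.2.1, st.2.2.2)
        else if q.2 = "L" then (st.1, st.2.1 ++ [q.1], st.2.2.1, st.2.2.2)
        else if q.2 = "D" then (st.1, st.2.1, st.2.2.1 ++ [q.1], st.2.2.2)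
        else if q.2 = "U" then (st.1, st.2.1, st.2.2.1, st.2.2.2 ++ [q.1])
        else st)
      (a, b, c, d))
    = (a ++ pvFm "R" l, b ++ pvFm "L" l, c ++ pvFm "D" l, d ++ pvFm "U" l) := by
  induction l generalizing a b c d with
  | nil => simp [pvFm]
  | cons q t ih =>
    simp only [List.foldl_cons]
    split_ifs with h1 h2 h3 h4 <;>
      simp [pvFm, List.filterMap_cons, *, List.append_assoc]

theorem pv_countP_fm (c : String) (ds : List String) (j : Int) : ∀ (n : Int),
    ((pvFm c (PySem.List.enumerate ds n)).countP (fun e => decide (e < j)) : Int)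
      = pvCnt c (ds.take (j - n).toNat) := by
  induction ds with
  | nil => intro n; simp [pvFm, pvCnt, PySem.List.enumerate_nil]
  | cons d t ih =>
    intro n
    rw [PySem.List.enumerate_cons]
    have ih' := ih (n + 1)
    by_cases hnj : n < j
    · have h1 : (j - n).toNat = (j - (n + 1)).toNat + 1 := by omega
      by_cases hd : d = c
      · subst hd
        simp [pvFm, List.filterMap_cons, List.countP_cons, hnj, h1, List.take_succ_cons,
              pvCnt, List.count_cons] at ih' ⊢
        omega
      · simp [pvFm, List.filterMap_cons, hd, h1, List.take_succ_cons,
              pvCnt, List.count_cons] at ih' ⊢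
        omega
    · have h1 : (j - n).toNat = 0 := by omega
      have h2 : (j - (n + 1)).toNat = 0 := by omega
      by_cases hd : d = c
      · subst hd
        simp [pvFm, List.filterMap_cons, List.countP_cons, hnj, h1, h2, pvCnt] at ih' ⊢
        omega
      · simp [pvFm, List.filterMap_cons, hd, h1, h2, pvCnt] at ih' ⊢
        omega

-- A's if/elif step adds the signed unit vector of d
theorem pv_step_delta (x y : Int) (d : String) :
    (if d = "R" then (x, y + 1)
     else if d = "L" then (x, y - 1)
     else if d = "D" then (x + 1, y)
     else if d = "U" then (x - 1, y)
     else (x, y))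
    = (x + (pvCnt "D" [d] - pvCnt "U" [d]), y + (pvCnt "R" [d] - pvCnt "L" [d])) := by
  split_ifs with h1 h2 h3 h4 <;>
    simp_all [pvCnt, List.count_cons] <;> omega

-- invariant of A's loop: starting at position p = offset, it appends the reference edges
theorem pv_loopA (t : List String) (p : Int × Int) (acc : List ((Int × Int) × String)) (n : Int) :
    (t.foldl
      (fun (st : Int × Int × List ((Int × Int) × String)) d =>
        let x := st.1
        let y := st.2.1
        let path := st.2.2
        let prev := (x, y)
        let xy : Int × Int :=
          if d = "R" then (x, y + 1)
          else if d = "L" then (x, y - 1)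
          else if d = "D" then (x + 1, y)
          else if d = "U" then (x - 1, y)
          else (x, y)
        (xy.1, xy.2, path ++ [(prev, d)]))
      (p.1, p.2, acc)).2.2
    = acc ++ (PySem.List.enumerate t n).map
        (fun q =>
          ((p.1 + (pvCnt "D" (t.take (q.1 - n).toNat) - pvCnt "U" (t.take (q.1 - n).toNat)),
            p.2 + (pvCnt "R" (t.take (q.1 - n).toNat) - pvCnt "L" (t.take (q.1 - n).toNat))), q.2)) := by
  induction t generalizing p acc n with
  | nil => simp [PySem.List.enumerate_nil, pvCnt]
  | cons d t ih =>
    rw [PySem.List.enumerate_cons]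
    simp only [List.foldl_cons, List.map_cons]
    rw [pv_step_delta p.1 p.2 d]
    rw [ih (p.1 + (pvCnt "D" [d] - pvCnt "U" [d]), p.2 + (pvCnt "R" [d] - pvCnt "L" [d]))
        (acc ++ [((p.1, p.2), d)]) (n + 1)]
    have hmap : ∀ q ∈ PySem.List.enumerate t (n + 1),
        ((p.1 + (pvCnt "D" [d] - pvCnt "U" [d]) +
            (pvCnt "D" (t.take (q.1 - (n + 1)).toNat) - pvCnt "U" (t.take (q.1 - (n + 1)).toNat)),
          p.2 + (pvCnt "R" [d] - pvCnt "L" [d]) +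
            (pvCnt "R" (t.take (q.1 - (n + 1)).toNat) - pvCnt "L" (t.take (q.1 - (n + 1)).toNat))), q.2)
        = ((p.1 + (pvCnt "D" ((d :: t).take (q.1 - n).toNat) - pvCnt "U" ((d :: t).take (q.1 - n).toNat)),
            p.2 + (pvCnt "R" ((d :: t).take (q.1 - n).toNat) - pvCnt "L" ((d :: t).take (q.1 - n).toNat))), q.2) := by
      intro q hq
      obtain ⟨k, hk, rfl⟩ := (PySem.List.mem_enumerate_iff _ _ _).1 hq
      have h1 : (n + 1 + (k : Int) - n).toNat = k + 1 := by omega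
      have h2 : (n + 1 + (k : Int) - (n + 1)).toNat = k := by omega
      simp only [h1, h2, List.take_succ_cons, Prod.mk.injEq]
      refine ⟨⟨?_, ?_⟩, trivial⟩ <;> simp [pvCnt, List.count_cons] <;> split_ifs <;> push_cast <;> omega
    rw [List.map_congr_left hmap]
    have hn : ((n : Int) - n).toNat = 0 := by omega
    simp [hn, pvCnt, List.append_assoc]

-- both ports equal the reference list
theorem pvA_eq_ref (ds : List String) : path_to_edges_py ds = pvRef ds := by
  unfold path_to_edges_py pvRef
  rw [pv_loopA ds (0, 0) [] 0]
  simp only [List.nil_append]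
  apply List.map_congr_left
  intro q hq
  obtain ⟨k, hk, rfl⟩ := (PySem.List.mem_enumerate_iff _ _ _).1 hq
  have h : ((0 : Int) + (k : Int) - 0).toNat = ((0 : Int) + (k : Int)).toNat := by omega
  simp [h]

theorem pvB_eq_ref (ds : List String) : path_to_edges_py_alt ds = pvRef ds := by
  unfold path_to_edges_py_alt pvRef
  rw [pv_occ_fold (PySem.List.enumerate ds 0) [] [] [] []]
  simp only [List.nil_append]
  apply List.map_congr_left
  intro q hq
  obtain ⟨k, hk, rfl⟩ := (PySem.List.mem_enumerate_iff _ _ _).1 hq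
  have h : ∀ c : String, pvBisectLeft (pvFm c (PySem.List.enumerate ds 0)) (0 + (k : Int))
      = pvCnt c (ds.take ((0 : Int) + (k : Int)).toNat) := by
    intro c
    have := pv_countP_fm c ds (0 + (k : Int)) 0
    simpa [pvBisectLeft] using this
  rw [h, h, h, h]

-- ===== VERDICT (by name: the statement is the Claim_ definition above) =====
theorem path_to_edges_py_spec : Claim_equal_path_to_edges_py := by
  intro ds _
  unfold Spec_path_to_edges_py
  rw [pvA_eq_ref, pvB_eq_ref]
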